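-- pv_equiv track=rewrite | github.com/scottstanie/apertools | apertools/utils.py | block_slices
-- ===== SOURCE A (Python) =====
-- def block_slices(arr_shape, block_shape, overlaps=(0, 0), start_offsets=(0, 0)):
--     """Iterator to get indexes for accessing blocks of a raster
--
--     Args:
--         arr_shape = (num_rows, num_cols), full size of array to access
--         block_shape = (height, width), size of accessing blocks
--         overlaps = (row_overlap, col_overlap), number of pixels to re-include
--             after sliding the block (default (0, 0))
--         start_offset = (row_offset, col_offset) starting location (default (0,0))
--     Yields:
--         iterator: ((row_start, row_end), (col_start, col_end))
--
--     Notes: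
--         If the block_shape/overlaps don't evenly divide the full arr_shape,
--         It will return the edges as smaller blocks, rather than skip them
--
--     Examples:
--     >>> list(block_slices((180, 250), (100, 100)))
--     [((0, 100), (0, 100)), ((0, 100), (100, 200)), ((0, 100), (200, 250)), \
-- ((100, 180), (0, 100)), ((100, 180), (100, 200)), ((100, 180), (200, 250))]
--     >>> list(block_slices((180, 250), (100, 100), overlaps=(10, 10)))
--     [((0, 100), (0, 100)), ((0, 100), (90, 190)), ((0, 100), (180, 250)), \
-- ((90, 180), (0, 100)), ((90, 180), (90, 190)), ((90, 180), (180, 250))]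
--     """
--     rows, cols = arr_shape
--     row_off, col_off = start_offsets
--     row_overlap, col_overlap = overlaps
--     height, width = block_shape
--
--     if height is None:
--         height = rows
--     if width is None:
--         width = cols
--
--     # Check we're not moving backwards with the overlap:
--     if row_overlap >= height:
--         raise ValueError(f"{row_overlap = } must be less than {height = }")
--     if col_overlap >= width:
--         raise ValueError(f"{col_overlap = } must be less than {width = }")
--     while row_off < rows:
--         while col_off < cols:
--             row_end = min(row_off + height, rows)  # Dont yield something OOB
--             col_end = min(col_off + width, cols)
--             yield ((row_off, row_end), (col_off, col_end))
--
--             col_off += width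
--             if col_off < cols:  # dont bring back if already at edge
--                 col_off -= col_overlap
--
--         row_off += height
--         if row_off < rows:
--             row_off -= row_overlap
--         col_off = 0
-- ===== SOURCE B (Python) =====
-- def _bounds(length, size, overlap, offset):
--     """Closed-form 1D tile boundaries: count the tiles arithmetically
--     (step = size - overlap; starts must stay below length - max(overlap, 0)),
--     then emit them with a range comprehension -- no stepping loop."""
--     if offset >= length:
--         return []
--     step = size - overlap
--     last = length - max(overlap, 0)  # tile k >= 1 exists iff its start < last
--     n = 1 + max(0, (last - offset - 1) // step)
--     return [(offset + k * step, min(offset + k * step + size, length))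
--             for k in range(n)]
--
--
-- def block_slices(arr_shape, block_shape, overlaps=(0, 0), start_offsets=(0, 0)):
--     rows, cols = arr_shape
--     row_off, col_off = start_offsets
--     row_overlap, col_overlap = overlaps
--     height, width = block_shape
--     if height is None:
--         height = rows
--     if width is None:
--         width = cols
--     if row_overlap >= height:
--         raise ValueError(f"{row_overlap = } must be less than {height = }")
--     if col_overlap >= width:
--         raise ValueError(f"{col_overlap = } must be less than {width = }")
--     row_bounds = _bounds(rows, height, row_overlap, row_off)
--     if row_bounds:
--         # first row uses the column start offset, all later rows start at 0
--         for c in _bounds(cols, width, col_overlap, col_off):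
--             yield (row_bounds[0], c)
--         zero_cols = _bounds(cols, width, col_overlap, 0)
--         for r in row_bounds[1:]:
--             for c in zero_cols:
--                 yield (r, c)
-- ===== Notes on version B (the rewrite author's own statement) =====
-- stated objective: alternative
-- what changed: Replaced A's stepping while-loops by closed-form arithmetic: the number of 1D tiles per axis is computed directly from a floor division (n = 1 + max(0,(length - max(overlap,0) - offset - 1)//(size-overlap))) and the boundaries are emitted by a range comprehension; rows are then paired with the offset column list (first row) and the zero-offset column list (rest).
import Mathlib
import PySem

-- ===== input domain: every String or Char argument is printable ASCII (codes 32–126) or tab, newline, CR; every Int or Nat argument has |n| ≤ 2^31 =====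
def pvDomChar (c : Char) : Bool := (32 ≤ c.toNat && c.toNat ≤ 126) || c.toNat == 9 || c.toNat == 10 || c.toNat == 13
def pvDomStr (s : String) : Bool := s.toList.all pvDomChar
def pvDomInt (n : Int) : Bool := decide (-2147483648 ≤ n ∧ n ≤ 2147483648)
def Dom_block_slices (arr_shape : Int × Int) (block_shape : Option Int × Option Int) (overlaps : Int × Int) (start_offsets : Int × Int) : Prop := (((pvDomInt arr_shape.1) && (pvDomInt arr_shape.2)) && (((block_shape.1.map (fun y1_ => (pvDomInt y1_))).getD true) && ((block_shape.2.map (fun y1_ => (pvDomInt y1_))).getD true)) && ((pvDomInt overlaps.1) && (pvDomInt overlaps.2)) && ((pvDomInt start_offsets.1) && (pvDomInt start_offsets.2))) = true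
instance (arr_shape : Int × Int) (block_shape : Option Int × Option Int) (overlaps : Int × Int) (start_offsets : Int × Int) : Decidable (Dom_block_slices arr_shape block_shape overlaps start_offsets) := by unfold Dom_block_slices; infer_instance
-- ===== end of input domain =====

-- B replaces A's stepping while-loops by a closed-form tile count (a floor division) and a
-- range comprehension per axis; the return value is the point proved equal (A is a generator).

-- ===== PORT A =====
-- inner 'while col_off < cols' loop of A (hco makes the loop's net step positive, so it terminates)
def pvColLoop (rows cols height width co : Int) (hco : co < width) (r c : Int) :
    List ((Int × Int) × (Int × Int)) :=
  if h : c < cols then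
    ((r, min (r + height) rows), (c, min (c + width) cols)) ::
      (if h2 : c + width < cols then pvColLoop rows cols height width co hco r (c + width - co)
       else [])
  else []
termination_by (cols - c).toNat
decreasing_by omega

-- outer 'while row_off < rows' loop of A (col_off is reset to 0 for later rows)
def pvRowLoop (rows cols height width ro co : Int) (hro : ro < height) (hco : co < width)
    (r c : Int) : List ((Int × Int) × (Int × Int)) :=
  if h : r < rows then
    pvColLoop rows cols height width co hco r c ++
      pvRowLoop rows cols height width ro co hro hco
        (if r + height < rows then r + height - ro else r + height) 0
  else []
termination_by (rows - r).toNat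
decreasing_by split <;> omega

def block_slices (arr_shape : Int × Int) (block_shape : Option Int × Option Int) (overlaps : Int × Int) (start_offsets : Int × Int) : List ((Int × Int) × (Int × Int)) :=
  let rows := arr_shape.1; let cols := arr_shape.2
  let height := block_shape.1.getD rows
  let width := block_shape.2.getD cols
  if hro : overlaps.1 < height then
    if hco : overlaps.2 < width then
      pvRowLoop rows cols height width overlaps.1 overlaps.2 hro hco start_offsets.1 start_offsets.2
    else []  -- Python raises ValueError (col_overlap >= width); outside Pre_
  else []    -- Python raises ValueError (row_overlap >= height); outside Pre_

-- ===== PORT B =====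
-- B's _bounds helper: closed-form count, then a range comprehension
def pvBoundsB (length size overlap offset : Int) : List (Int × Int) :=
  if offset < length then
    let step := size - overlap
    let last := length - max overlap 0
    let n := 1 + max 0 (PySem.Int.floordiv (last - offset - 1) step)
    (PySem.List.pyRange 0 n 1).map
      (fun k => (offset + k * step, min (offset + k * step + size) length))
  else []

def block_slices_alt (arr_shape : Int × Int) (block_shape : Option Int × Option Int) (overlaps : Int × Int) (start_offsets : Int × Int) : List ((Int × Int) × (Int × Int)) :=
  let rows := arr_shape.1; let cols := arr_shape.2
  let height := block_shape.1.getD rows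
  let width := block_shape.2.getD cols
  if _hro : overlaps.1 < height then
    if _hco : overlaps.2 < width then
      match pvBoundsB rows height overlaps.1 start_offsets.1 with
      | [] => []
      | first :: rest =>
          (pvBoundsB cols width overlaps.2 start_offsets.2).map (fun c => (first, c)) ++
            rest.flatMap (fun r => (pvBoundsB cols width overlaps.2 0).map (fun c => (r, c)))
    else []
  else []

-- ===== PRECONDITION & SPEC =====
-- Pre_ excludes exactly the inputs on which A raises ValueError (an overlap ≥ the block size).
def Pre_block_slices (arr_shape : Int × Int) (block_shape : Option Int × Option Int) (overlaps : Int × Int) (start_offsets : Int × Int) : Prop :=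
  overlaps.1 < block_shape.1.getD arr_shape.1 ∧ overlaps.2 < block_shape.2.getD arr_shape.2
instance (arr_shape : Int × Int) (block_shape : Option Int × Option Int) (overlaps : Int × Int) (start_offsets : Int × Int) : Decidable (Pre_block_slices arr_shape block_shape overlaps start_offsets) := by unfold Pre_block_slices; infer_instance

def pvWitness_block_slices : (Int × Int) × (Option Int × Option Int) × (Int × Int) × (Int × Int) :=
  ((7, 9), (some 3, some 4), (1, 1), (0, 0))

def Spec_block_slices (arr_shape : Int × Int) (block_shape : Option Int × Option Int) (overlaps : Int × Int) (start_offsets : Int × Int) (out : List ((Int × Int) × (Int × Int))) : Prop := out = block_slices_alt arr_shape block_shape overlaps start_offsets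
instance (arr_shape : Int × Int) (block_shape : Option Int × Option Int) (overlaps : Int × Int) (start_offsets : Int × Int) (out : List ((Int × Int) × (Int × Int))) : Decidable (Spec_block_slices arr_shape block_shape overlaps start_offsets out) := by unfold Spec_block_slices; infer_instance

-- ===== CLAIM =====
def Claim_equal_block_slices : Prop := ∀ (arr_shape : Int × Int) (block_shape : Option Int × Option Int) (overlaps : Int × Int) (start_offsets : Int × Int), Dom_block_slices arr_shape block_shape overlaps start_offsets → Pre_block_slices arr_shape block_shape overlaps start_offsets → Spec_block_slices arr_shape block_shape overlaps start_offsets (block_slices arr_shape block_shape overlaps start_offsets)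

-- ===== LEMMAS AND PROOFS =====

-- proof-side model of A's 1D stepping (the shape both loops share)
def pvSteps (length size overlap : Int) (hyp : overlap < size) (pos : Int) : List (Int × Int) :=
  if h : pos < length then
    (pos, min (pos + size) length) ::
      pvSteps length size overlap hyp
        (if pos + size < length then pos + size - overlap else pos + size)
  else []
termination_by (length - pos).toNat
decreasing_by split <;> omega

-- A's inner loop is the 1D stepping boundaries paired with the fixed row interval
lemma colLoop_eq_steps (rows cols height width co : Int) (hco : co < width) (r c : Int) :
    pvColLoop rows cols height width co hco r c =
      (pvSteps cols width co hco c).map (fun p => ((r, min (r + height) rows), p)) := by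
  fun_induction pvColLoop rows cols height width co hco r c with
  | case1 c h ih =>
      rw [pvSteps]
      by_cases h2 : c + width < cols
      · simp [h, h2, ih]
      · simp only [h, dif_pos, if_neg h2, List.map_cons, dite_eq_ite]
        rw [pvSteps]
        simp [h2]
  | case2 c h =>
      rw [pvSteps]; simp [h]

-- B's closed form satisfies A's stepping recurrence
lemma boundsB_rec (length size overlap pos : Int) (hyp : overlap < size) (h : pos < length) :
    pvBoundsB length size overlap pos =
      (pos, min (pos + size) length) ::
        pvBoundsB length size overlap
          (if pos + size < length then pos + size - overlap else pos + size) := by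
  have hstep : (0:Int) < size - overlap := by omega
  have hq := PySem.Int.floordiv_lt_iff_lt_mul
    (a := length - max overlap 0 - pos - 1) (b := size - overlap) (q := 1) hstep
  have hq2 := PySem.Int.le_floordiv_iff_mul_le
    (a := length - max overlap 0 - pos - 1) (b := size - overlap) (q := 1) hstep
  set q := PySem.Int.floordiv (length - max overlap 0 - pos - 1) (size - overlap) with hqdef
  by_cases hn : (if pos + size < length then pos + size - overlap else pos + size) < length
  · -- the loop continues: pos + size < length and next = pos + size - overlap < length
    have hlt : pos + size < length := by
      by_contra hge
      rw [if_neg hge] at hn; omega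
    rw [if_pos hlt] at hn ⊢
    have hq1 : 1 ≤ q := by
      rw [hq2]
      by_cases ho : 0 ≤ overlap
      · simp only [max_eq_left ho, one_mul]; omega
      · simp only [max_eq_right (by omega : overlap ≤ 0), one_mul]; omega
    unfold pvBoundsB
    simp only [if_pos h, if_pos hn]
    have hq' : PySem.Int.floordiv (length - max overlap 0 - (pos + size - overlap) - 1)
        (size - overlap) = q - 1 := by
      have harg : length - max overlap 0 - (pos + size - overlap) - 1
          = (length - max overlap 0 - pos - 1) + (-1) * (size - overlap) := by ring
      rw [harg, hqdef, PySem.Int.floordiv_eq_ediv_of_pos hstep,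
        PySem.Int.floordiv_eq_ediv_of_pos hstep,
        Int.add_mul_ediv_right _ _ (by omega : size - overlap ≠ 0)]
      ring
    rw [hq']
    rw [max_eq_right (by omega : (0:Int) ≤ q), max_eq_right (by omega : (0:Int) ≤ q - 1)]
    rw [PySem.List.pyRange_one_cons (by omega : (0:Int) < 1 + q)]
    simp only [List.map_cons, zero_mul, add_zero, zero_add]
    congr 1
    rw [PySem.List.pyRange_one, PySem.List.pyRange_one]
    rw [List.map_map, List.map_map]
    rw [(by omega : ((1 + q - 1).toNat) = ((1 + (q - 1) - 0).toNat))]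
    apply List.map_congr_left
    intro k _
    simp only [Function.comp_apply]
    have e1 : pos + (1 + (k:Int)) * (size - overlap)
        = pos + size - overlap + (0 + (k:Int)) * (size - overlap) := by ring
    rw [e1]
  · -- the loop stops after this block
    have hq0 : q < 1 := by
      rw [hq]
      by_cases ho : 0 ≤ overlap
      · simp only [max_eq_left ho, one_mul]
        split at hn <;> omega
      · simp only [max_eq_right (by omega : overlap ≤ 0), one_mul]
        split at hn <;> omega
    unfold pvBoundsB
    simp only [if_pos h, if_neg hn]
    rw [max_eq_left (by omega : q ≤ 0)]
    rw [PySem.List.pyRange_one_cons (by omega : (0:Int) < 1 + 0)]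
    rw [PySem.List.pyRange_one_eq_nil (by omega)]
    simp

-- the stepping recursion computes B's closed-form boundary list
lemma steps_eq_boundsB (length size overlap : Int) (hyp : overlap < size) (pos : Int) :
    pvSteps length size overlap hyp pos = pvBoundsB length size overlap pos := by
  fun_induction pvSteps length size overlap hyp pos with
  | case1 pos h ih =>
      simp only [dite_eq_ite] at ih
      rw [ih, boundsB_rec length size overlap pos hyp h]
  | case2 pos h =>
      unfold pvBoundsB
      simp [h]

-- A's outer loop in B's head/tail product shape
lemma rowLoop_eq (rows cols height width ro co : Int) (hro : ro < height) (hco : co < width)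
    (r c : Int) :
    pvRowLoop rows cols height width ro co hro hco r c =
      match pvSteps rows height ro hro r with
      | [] => []
      | first :: rest =>
          (pvSteps cols width co hco c).map (fun p => (first, p)) ++
            rest.flatMap (fun rr => (pvSteps cols width co hco 0).map (fun p => (rr, p))) := by
  fun_induction pvRowLoop rows cols height width ro co hro hco r c with
  | case1 r c h ih =>
      rw [pvSteps.eq_def (length := rows) (pos := r)]
      simp only [h, dif_pos, dite_eq_ite]
      simp only [dite_eq_ite] at ih
      rw [colLoop_eq_steps, ih]
      cases hs : pvSteps rows height ro hro
          (if r + height < rows then r + height - ro else r + height) with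
      | nil => simp
      | cons f t => simp [List.flatMap_cons]
  | case2 r c h =>
      rw [pvSteps.eq_def (length := rows) (pos := r)]
      simp [h]

-- ===== VERDICT =====
theorem block_slices_spec : Claim_equal_block_slices := by
  intro arr bs ov so _ hpre
  obtain ⟨h1, h2⟩ := hpre
  unfold Spec_block_slices block_slices block_slices_alt
  simp only [dif_pos h1, dif_pos h2]
  rw [rowLoop_eq, steps_eq_boundsB, steps_eq_boundsB (pos := so.2), steps_eq_boundsB (pos := 0)]
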